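-- pv_equiv track=rewrite | github.com/JingZheLim/RSP | Python Project/hangman.py | buildGuessedWord
-- ===== SOURCE A (Python) =====
-- def buildGuessedWord(correctWord, guessedLetters):
--     currentLetters = []
--     # for each letter in correct word
--     for letter in correctWord:
--         # if the letter is part of the correct word is in guessed letters
--         if letter in guessedLetters:
--             # Add the correct letter to currentLetters
--             currentLetters.append(letter)
--         # else it isn't part of the word and add _
--         else:
--             currentLetters.append("_")
--     # .join() will include correct letters in their corresponding spots
--     return " ".join(currentLetters)
-- ===== SOURCE B (Python) =====
-- def buildGuessedWord(correctWord, guessedLetters):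
--     result = ["_"] * len(correctWord)
--     positions = {}
--     for i, ch in enumerate(correctWord):
--         positions.setdefault(ch, []).append(i)
--     for g in guessedLetters:
--         for i in positions.get(g, []):
--             result[i] = g
--     return " ".join(result)
-- ===== Notes on version B (the rewrite author's own statement) =====
-- stated objective: alternative
-- what changed: Instead of scanning the word and testing list membership per position, B prebuilds a dict from each character to its list of indices and fills a preallocated '_' buffer by iterating over the guessed letters; it trades A's per-position membership scan for a one-pass positional index.
import Mathlib
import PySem

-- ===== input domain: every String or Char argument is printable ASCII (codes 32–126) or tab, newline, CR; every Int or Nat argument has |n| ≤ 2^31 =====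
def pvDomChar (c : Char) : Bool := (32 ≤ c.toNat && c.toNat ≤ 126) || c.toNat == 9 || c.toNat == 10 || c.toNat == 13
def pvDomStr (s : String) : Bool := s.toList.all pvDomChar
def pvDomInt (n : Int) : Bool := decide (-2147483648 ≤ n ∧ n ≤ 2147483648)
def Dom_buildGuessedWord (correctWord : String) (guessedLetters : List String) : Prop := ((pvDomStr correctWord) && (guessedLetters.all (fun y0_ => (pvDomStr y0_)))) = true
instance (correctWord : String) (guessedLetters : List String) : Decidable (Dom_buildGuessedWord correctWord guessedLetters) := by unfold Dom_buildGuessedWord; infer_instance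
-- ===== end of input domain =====

-- B replaces A's per-position membership scan by a prebuilt char→indices dict driving
-- writes into a preallocated '_' buffer (objective: alternative decomposition).


-- ===== PORT A =====
-- A: for each letter of correctWord append the letter if it is in guessedLetters else "_", then " ".join
def buildGuessedWord (correctWord : String) (guessedLetters : List String) : String :=
  let currentLetters := correctWord.toList.foldl
    (fun acc letter =>
      if String.mk [letter] ∈ guessedLetters then acc ++ [String.mk [letter]]
      else acc ++ ["_"]) []
  PySem.Str.join " " currentLetters

-- ===== PORT B =====
-- B: result = ['_']*n; positions: dict char→indices built over enumerate(correctWord)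
-- (setdefault(...).append(i) = modify with default [] appending i); then for each guessed
-- letter write it at its positions; " ".join(result). Indices come from enumerate so are ≥ 0.
def buildGuessedWord_alt (correctWord : String) (guessedLetters : List String) : String :=
  let word := correctWord.toList
  let result0 := List.replicate word.length "_"
  let positions := ((PySem.List.enumerate word 0).map (fun p => (String.mk [p.2], p.1))).foldl
      (fun d p => d.modify p.1 [] (· ++ [p.2])) PySem.Dict.empty
  let result := guessedLetters.foldl
      (fun r g => (positions.getD g []).foldl (fun r i => r.set i.toNat g) r) result0
  PySem.Str.join " " result

-- ===== PRECONDITION & SPEC =====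
def Spec_buildGuessedWord (correctWord : String) (guessedLetters : List String) (out : String) : Prop := out = buildGuessedWord_alt correctWord guessedLetters
instance (correctWord : String) (guessedLetters : List String) (out : String) : Decidable (Spec_buildGuessedWord correctWord guessedLetters out) := by unfold Spec_buildGuessedWord; infer_instance

-- ===== CLAIM (what is proved, stated in full; the proofs are below) =====
def Claim_equal_buildGuessedWord : Prop := ∀ (correctWord : String) (guessedLetters : List String), Dom_buildGuessedWord correctWord guessedLetters → Spec_buildGuessedWord correctWord guessedLetters (buildGuessedWord correctWord guessedLetters)

-- ===== LEMMAS AND PROOFS =====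

-- the common value: per position, the letter if guessed else "_"
def bgwCell (guessedLetters : List String) (c : Char) : String :=
  if String.mk [c] ∈ guessedLetters then String.mk [c] else "_"

-- A's accumulation is the map of bgwCell
lemma bgwA_foldl (gls : List String) (l : List Char) (acc : List String) :
    l.foldl (fun acc letter =>
      if String.mk [letter] ∈ gls then acc ++ [String.mk [letter]] else acc ++ ["_"]) acc
    = acc ++ l.map (bgwCell gls) := by
  induction l generalizing acc with
  | nil => simp
  | cons c l ih =>
    simp only [List.foldl_cons, List.map_cons, bgwCell]
    split_ifs with h <;> simp [ih, h]

-- a fold of set over Int indices (taken via toNat), pointwise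
lemma bgwSet_foldl_getElem? {a : Type} (L : List Int) (r : List a) (g : a) (j : Nat) :
    (L.foldl (fun r i => r.set i.toNat g) r)[j]? =
      if (∃ i ∈ L, i.toNat = j) ∧ j < r.length then some g else r[j]? := by
  induction L generalizing r with
  | nil => simp
  | cons i L ih =>
    simp only [List.foldl_cons]
    rw [ih]
    by_cases hj : j < r.length
    · by_cases hL : ∃ i' ∈ L, i'.toNat = j
      · rcases hL with ⟨i', hi', hij⟩
        rw [if_pos ⟨⟨i', hi', hij⟩, by simpa using hj⟩,
            if_pos ⟨⟨i', List.mem_cons_of_mem _ hi', hij⟩, hj⟩]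
      · rw [if_neg (fun h => hL h.1)]
        by_cases hji : j = i.toNat
        · rw [if_pos ⟨⟨i, List.mem_cons_self, hji.symm⟩, hj⟩, hji,
              List.getElem?_set_self (by omega)]
        · rw [if_neg (by
              rintro ⟨⟨i', hi', hij⟩, _⟩
              rcases List.mem_cons.mp hi' with rfl | hmem
              · exact hji hij.symm
              · exact hL ⟨i', hmem, hij⟩),
            List.getElem?_set_ne (show i.toNat ≠ j by omega)]
    · rw [if_neg (by rintro ⟨_, h⟩; simp at h; omega), if_neg (by rintro ⟨_, h⟩; omega),
          List.getElem?_eq_none (show r.length ≤ j by omega),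
          List.getElem?_eq_none (show (r.set i.toNat g).length ≤ j by simp; omega)]

lemma bgwSet_foldl_length {a : Type} (L : List Int) (r : List a) (g : a) :
    (L.foldl (fun r i => r.set i.toNat g) r).length = r.length := by
  induction L generalizing r with
  | nil => rfl
  | cons i L ih => simp [List.foldl_cons, ih]

-- the positions dict: getD g [] lists exactly the indices of occurrences of g (as a 1-char string)
lemma bgwPos_getD (word : List Char) (g : String) :
    ((((PySem.List.enumerate word 0).map (fun p => (String.mk [p.2], p.1))).foldl
      (fun d p => d.modify p.1 [] (· ++ [p.2])) PySem.Dict.empty).getD g [])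
    = (((PySem.List.enumerate word 0).filter (fun p => String.mk [p.2] == g)).map (·.1)) := by
  rw [PySem.Dict.getD_foldl_modify_append]
  simp [PySem.Dict.getD_empty, List.filter_map, List.map_map, Function.comp_def]

-- membership in the Nat-converted positions of g
lemma bgwPos_mem (word : List Char) (g : String) (j : Nat) (hj : j < word.length) :
    ((j : Int) ∈ (((PySem.List.enumerate word 0).filter
        (fun p => String.mk [p.2] == g)).map (·.1)))
      ↔ String.mk [word[j]] = g := by
  simp only [List.mem_map, List.mem_filter, PySem.List.mem_enumerate_iff]
  constructor
  · rintro ⟨p, ⟨⟨k, hk, rfl⟩, hg⟩, hjk⟩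
    simp only [zero_add] at hjk hg
    have : k = j := by exact_mod_cast hjk
    subst this
    simpa using hg
  · intro hg
    exact ⟨((j : Int), word[j]), ⟨⟨j, hj, by simp⟩, by simpa using hg⟩, rfl⟩

-- the fill loop over guessed letters, pointwise
lemma bgwFill_getElem? (word : List Char) (gls : List String) (r : List String)
    (hr : r.length = word.length) (j : Nat) (hj : j < word.length) :
    (gls.foldl (fun r g =>
        (((((PySem.List.enumerate word 0).map (fun p => (String.mk [p.2], p.1))).foldl
          (fun d p => d.modify p.1 [] (· ++ [p.2])) PySem.Dict.empty).getD g []).foldl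
          (fun r i => r.set i.toNat g) r)) r)[j]? =
      if String.mk [word[j]] ∈ gls then some (String.mk [word[j]]) else r[j]? := by
  induction gls generalizing r with
  | nil => simp
  | cons g gls ih =>
    simp only [List.foldl_cons]
    rw [ih _ (by rw [bgwSet_foldl_length]; exact hr)]
    by_cases hmem : String.mk [word[j]] ∈ gls
    · simp [hmem]
    · have hstep :
          ((((((PySem.List.enumerate word 0).map (fun p => (String.mk [p.2], p.1))).foldl
            (fun d p => d.modify p.1 [] (· ++ [p.2])) PySem.Dict.empty).getD g []).foldl
            (fun r i => r.set i.toNat g) r))[j]? =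
          if String.mk [word[j]] = g then some g else r[j]? := by
        rw [bgwPos_getD, bgwSet_foldl_getElem?]
        by_cases hg : String.mk [word[j]] = g
        · have hmemI : (j : Int) ∈ (((PySem.List.enumerate word 0).filter
              (fun p => String.mk [p.2] == g)).map (·.1)) := (bgwPos_mem word g j hj).mpr hg
          rw [if_pos ⟨⟨(j : Int), hmemI, by simp⟩, by omega⟩, if_pos hg]
        · have hnj : ¬ ∃ i ∈ (((PySem.List.enumerate word 0).filter
              (fun p => String.mk [p.2] == g)).map (·.1)), i.toNat = j := by
            rintro ⟨i, hi, rfl⟩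
            have hnn : 0 ≤ i ∧ i < word.length := by
              rcases List.mem_map.mp hi with ⟨p, hp, hpi⟩
              rcases (PySem.List.mem_enumerate_iff _ _ _).mp (List.mem_filter.mp hp).1
                with ⟨k, hk, rfl⟩
              simp at hpi
              omega
            have hcast : ((i.toNat : Nat) : Int) = i := by omega
            exact hg ((bgwPos_mem word g i.toNat (by omega)).mp (by rw [hcast]; exact hi))
          rw [if_neg (by rintro ⟨h1, _⟩; exact hnj h1), if_neg hg]
      rw [hstep]
      by_cases hg : String.mk [word[j]] = g <;> simp [hmem, hg]

-- ===== VERDICT (by name: the statement is the Claim_ definition above) =====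
theorem buildGuessedWord_spec : Claim_equal_buildGuessedWord := by
  intro correctWord guessedLetters _
  show _ = _
  unfold buildGuessedWord buildGuessedWord_alt
  simp only
  congr 1
  rw [bgwA_foldl, List.nil_append]
  apply List.ext_getElem?
  intro j
  by_cases hj : j < correctWord.toList.length
  · rw [bgwFill_getElem? _ _ _ (by simp) j hj,
        List.getElem?_map, List.getElem?_eq_getElem hj]
    simp only [Option.map_some]
    unfold bgwCell
    split_ifs with h
    · rfl
    · rw [List.getElem?_replicate, if_pos hj]
  · have h2 : ∀ (gls : List String) (r : List String),
        (gls.foldl (fun r g =>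
        (((((PySem.List.enumerate correctWord.toList 0).map (fun p => (String.mk [p.2], p.1))).foldl
          (fun d p => d.modify p.1 [] (· ++ [p.2])) PySem.Dict.empty).getD g []).foldl
          (fun r i => r.set i.toNat g) r)) r).length = r.length := by
      intro gls
      induction gls with
      | nil => intro r; rfl
      | cons g gls ih => intro r; rw [List.foldl_cons, ih, bgwSet_foldl_length]
    rw [List.getElem?_eq_none (by rw [List.length_map]; omega),
        List.getElem?_eq_none (by rw [h2, List.length_replicate]; omega)]
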